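-- pv_equiv track=rewrite | github.com/Tiffany0410/Compiler_Optimization | examples/loop/dataflow.py | merge_consts
-- ===== SOURCE A (Python) =====
-- from typing import Dict, Set, List, Callable, Tuple, Any
--
-- def merge_consts(l: List[Dict]) -> Dict:
--     result = {}
--     for m in l:
--         for k, const in m.items():
--             if k not in result:
--                 result[k] = const
--             elif result[k] != const:
--                 result[k] = None
--     return result
-- ===== SOURCE B (Python) =====
-- def merge_consts(l):
--     # pass 1: group every value seen for each key, first-occurrence order
--     groups = {}
--     for m in l:
--         for k, v in m.items():
--             if k in groups:
--                 groups[k] = groups[k] + [v]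
--             else:
--                 groups[k] = [v]
--     # pass 2: a key maps to its first value if all its values agree, else None
--     result = {}
--     for k, vals in groups.items():
--         v0 = vals[0]
--         result[k] = v0 if all(v == v0 for v in vals[1:]) else None
--     return result
-- ===== Notes on version B (the rewrite author's own statement) =====
-- stated objective: alternative
-- what changed: Replaces A's single incremental merge (insert-or-demote-to-None while scanning) by a two-pass group-then-resolve: first materialize a dict mapping each key to the list of all its values in order, then resolve each group to its first value or None.
import Mathlib
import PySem

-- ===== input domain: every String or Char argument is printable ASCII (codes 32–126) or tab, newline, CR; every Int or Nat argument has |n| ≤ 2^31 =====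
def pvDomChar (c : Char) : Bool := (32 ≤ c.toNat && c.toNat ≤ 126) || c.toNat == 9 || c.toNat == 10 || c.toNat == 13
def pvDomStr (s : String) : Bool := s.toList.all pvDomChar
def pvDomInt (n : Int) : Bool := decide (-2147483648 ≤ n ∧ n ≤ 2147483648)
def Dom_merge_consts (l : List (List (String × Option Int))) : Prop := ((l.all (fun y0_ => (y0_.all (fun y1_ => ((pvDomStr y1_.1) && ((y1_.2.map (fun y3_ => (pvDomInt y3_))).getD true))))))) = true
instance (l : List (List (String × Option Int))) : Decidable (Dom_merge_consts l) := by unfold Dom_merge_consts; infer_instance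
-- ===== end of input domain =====

-- B replaces A's single incremental merge with a two-pass group-then-resolve decomposition (objective: alternative).

-- ===== PORT A =====
-- one iteration of A's inner loop body on the running result dict
def mc_stepA (res : PySem.Dict String (Option Int)) (kv : String × Option Int) : PySem.Dict String (Option Int) :=
  match res.get? kv.1 with
  | none => res.insert kv.1 kv.2            -- if k not in result: result[k] = const
  | some cur => if cur ≠ kv.2 then res.insert kv.1 none else res   -- elif result[k] != const: result[k] = None

def merge_consts (l : List (List (String × Option Int))) : List (String × Option Int) :=
  (l.foldl (fun res m => m.foldl mc_stepA res) PySem.Dict.empty).items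

-- ===== PORT B =====
-- pass 1 body: append v to the group of k (fresh key starts a new singleton group)
def mc_stepG (g : PySem.Dict String (List (Option Int))) (kv : String × Option Int) : PySem.Dict String (List (Option Int)) :=
  match g.get? kv.1 with
  | some vs => g.insert kv.1 (vs ++ [kv.2])
  | none => g.insert kv.1 [kv.2]

-- pass 2 body: vals resolves to vals[0] if all(v == vals[0] for v in vals[1:]) else None
def mc_resolve (vals : List (Option Int)) : Option Int :=
  match vals with
  | [] => none            -- unreachable: every group is nonempty
  | v0 :: rest => if rest.all (fun v => v == v0) then v0 else none

def merge_consts_alt (l : List (List (String × Option Int))) : List (String × Option Int) :=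
  ((l.foldl (fun g m => m.foldl mc_stepG g) PySem.Dict.empty).items.foldl
    (fun r p => r.insert p.1 (mc_resolve p.2)) PySem.Dict.empty).items

-- ===== PRECONDITION & SPEC =====
def Spec_merge_consts (l : List (List (String × Option Int))) (out : List (String × Option Int)) : Prop := out = merge_consts_alt l
instance (l : List (List (String × Option Int))) (out : List (String × Option Int)) : Decidable (Spec_merge_consts l out) := by unfold Spec_merge_consts; infer_instance

-- ===== CLAIM (what is proved, stated in full; the proofs are below) =====
def Claim_equal_merge_consts : Prop := ∀ (l : List (List (String × Option Int))), Dom_merge_consts l → Spec_merge_consts l (merge_consts l)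

-- ===== LEMMAS AND PROOFS =====

-- in a dict with Nodup keys, a pair of the items list is determined by its key
lemma mc_pair_unique {V : Type} (d : PySem.Dict String V) (hnd : d.keys.Nodup)
    {k : String} {v : V} (hkv : (k, v) ∈ d.items) {p : String × V} (hp : p ∈ d.items)
    (hk : p.1 = k) : p = (k, v) := by
  have h1 := PySem.Dict.get?_of_mem_items d hkv hnd
  have h2 := PySem.Dict.get?_of_mem_items d hp hnd
  rw [hk, h1] at h2
  obtain ⟨p1, p2⟩ := p
  simp_all

-- appending a value that differs from the group's resolution kills the group
lemma mc_resolve_append_ne (v0 v : Option Int) (rest : List (Option Int))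
    (h : mc_resolve (v0 :: rest) ≠ v) : mc_resolve ((v0 :: rest) ++ [v]) = none := by
  cases hall : rest.all (fun x => x == v0) <;> simp_all [mc_resolve, List.all_append]
  exact fun _ hv => absurd hv.symm h

-- appending the group's own resolution leaves it unchanged
lemma mc_resolve_append_eq (v0 : Option Int) (rest : List (Option Int)) :
    mc_resolve ((v0 :: rest) ++ [mc_resolve (v0 :: rest)]) = mc_resolve (v0 :: rest) := by
  cases hall : rest.all (fun x => x == v0) <;> simp_all [mc_resolve, List.all_append]
  have hne : ¬ ∀ x ∈ rest, x = v0 := by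
    obtain ⟨x, hx, hn⟩ := hall; exact fun H => hn (H x hx)
  simp [hne]

-- the coupled-loop invariant: A's dict is the image of B's group dict under resolution
lemma mc_invariant (ps : List (String × Option Int)) :
    ∀ (g : PySem.Dict String (List (Option Int))) (r : PySem.Dict String (Option Int)),
    g.keys.Nodup →
    (∀ p ∈ g.items, p.2 ≠ []) →
    r.items = g.items.map (fun p => (p.1, mc_resolve p.2)) →
    (ps.foldl mc_stepA r).items
      = (ps.foldl mc_stepG g).items.map (fun p => (p.1, mc_resolve p.2)) := by
  induction ps with
  | nil => intro g r _ _ h; simpa using h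
  | cons kv ps ih =>
    intro g r hnd hne hitems
    obtain ⟨k, v⟩ := kv
    simp only [List.foldl_cons]
    have hkeys : r.keys = g.keys := by
      simp only [PySem.Dict.keys, hitems, List.map_map]; rfl
    cases hg : g.get? k with
    | none =>
      have hgc := (PySem.Dict.get?_eq_none_iff_contains g k).mp hg
      have hgm := (PySem.Dict.get?_eq_none_iff_not_mem_keys g k).mp hg
      have hr : r.get? k = none := by
        rw [PySem.Dict.get?_eq_none_iff_not_mem_keys, hkeys]; exact hgm
      have hrc := (PySem.Dict.get?_eq_none_iff_contains r k).mp hr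
      have hA : mc_stepA r (k, v) = r.insert k v := by simp [mc_stepA, hr]
      have hG : mc_stepG g (k, v) = g.insert k [v] := by simp [mc_stepG, hg]
      rw [hA, hG]
      apply ih
      · rw [PySem.Dict.keys_insert_of_not_contains g _ hgc]
        simp [List.nodup_append, hnd]
        intro a ha hak
        exact hgm (hak ▸ ha)
      · intro p hp
        rw [PySem.Dict.items_insert_of_not_contains g _ hgc] at hp
        rcases List.mem_append.mp hp with h1 | h1
        · exact hne p h1
        · simp only [List.mem_singleton] at h1
          simp [h1]
      · rw [PySem.Dict.items_insert_of_not_contains r _ hrc,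
            PySem.Dict.items_insert_of_not_contains g _ hgc, hitems]
        simp [mc_resolve]
    | some vs =>
      have hgc : g.contains k = true := by rw [PySem.Dict.contains_eq_isSome_get?, hg]; rfl
      have hmem := PySem.Dict.mem_items_of_get?_eq_some g hg
      have hvs : vs ≠ [] := hne _ hmem
      have hrmem : (k, mc_resolve vs) ∈ r.items := by
        rw [hitems]
        exact List.mem_map_of_mem hmem
      have hrnd : r.keys.Nodup := by rw [hkeys]; exact hnd
      have hr : r.get? k = some (mc_resolve vs) := PySem.Dict.get?_of_mem_items r hrmem hrnd
      have hG : mc_stepG g (k, v) = g.insert k (vs ++ [v]) := by simp [mc_stepG, hg]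
      rw [hG]
      have hnd' : (g.insert k (vs ++ [v])).keys.Nodup := by
        rw [PySem.Dict.keys_insert_of_contains g _ hgc]; exact hnd
      have hne' : ∀ p ∈ (g.insert k (vs ++ [v])).items, p.2 ≠ [] := by
        intro p hp
        rw [PySem.Dict.items_insert_of_contains g _ hgc] at hp
        obtain ⟨q, hq, hpq⟩ := List.mem_map.mp hp
        by_cases hqk : (q.1 == k) = true
        · rw [if_pos hqk] at hpq
          rw [← hpq]
          simp
        · rw [if_neg hqk] at hpq
          rw [← hpq]
          exact hne q hq
      obtain ⟨v0, rest, hvs0⟩ := List.exists_cons_of_ne_nil hvs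
      subst hvs0
      by_cases hvv : mc_resolve (v0 :: rest) = v
      · have hA : mc_stepA r (k, v) = r := by simp [mc_stepA, hr, hvv]
        rw [hA]
        apply ih _ _ hnd' hne'
        rw [hitems, PySem.Dict.items_insert_of_contains g _ hgc, List.map_map]
        apply List.map_congr_left
        intro p hp
        by_cases hpk : p.1 = k
        · have hpu := mc_pair_unique g hnd hmem hp hpk
          rw [hpu]
          simp only [Function.comp_apply, BEq.rfl, if_pos]
          rw [← hvv, mc_resolve_append_eq]
        · simp [Function.comp_apply, hpk]
      · have hA : mc_stepA r (k, v) = r.insert k none := by simp [mc_stepA, hr, hvv]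
        rw [hA]
        have hrc : r.contains k = true := by rw [PySem.Dict.contains_eq_isSome_get?, hr]; rfl
        apply ih _ _ hnd' hne'
        rw [PySem.Dict.items_insert_of_contains r _ hrc,
            PySem.Dict.items_insert_of_contains g _ hgc, hitems, List.map_map, List.map_map]
        apply List.map_congr_left
        intro p hp
        by_cases hpk : p.1 = k
        · have hpu := mc_pair_unique g hnd hmem hp hpk
          rw [hpu]
          simp only [Function.comp_apply, BEq.rfl, if_pos]
          rw [mc_resolve_append_ne _ _ _ hvv]
        · simp [Function.comp_apply, hpk]

-- B's second pass over a Nodup-key group dict is a map over its items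
lemma mc_second_pass (g : PySem.Dict String (List (Option Int))) (hnd : g.keys.Nodup) :
    (g.items.foldl (fun r p => r.insert p.1 (mc_resolve p.2)) PySem.Dict.empty).items
      = g.items.map (fun p => (p.1, mc_resolve p.2)) := by
  have h := PySem.Dict.items_foldl_insert_fresh g.items Prod.fst (fun p => mc_resolve p.2)
    PySem.Dict.empty (by intro a _; simp) hnd
  simpa [PySem.Dict.empty] using h

-- pass 1 keeps the group dict's keys Nodup
lemma mc_nodup_groups (ps : List (String × Option Int)) :
    ∀ (g : PySem.Dict String (List (Option Int))), g.keys.Nodup →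
    (ps.foldl mc_stepG g).keys.Nodup := by
  induction ps with
  | nil => intro g h; simpa using h
  | cons kv ps ih =>
    intro g h
    simp only [List.foldl_cons]
    apply ih
    cases hg : g.get? kv.1 with
    | some vs =>
      have hgc : g.contains kv.1 = true := by rw [PySem.Dict.contains_eq_isSome_get?, hg]; rfl
      simp only [mc_stepG, hg]
      rw [PySem.Dict.keys_insert_of_contains g _ hgc]
      exact h
    | none =>
      have hgc := (PySem.Dict.get?_eq_none_iff_contains g kv.1).mp hg
      have hgm := (PySem.Dict.get?_eq_none_iff_not_mem_keys g kv.1).mp hg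
      simp only [mc_stepG, hg]
      rw [PySem.Dict.keys_insert_of_not_contains g _ hgc]
      simp [List.nodup_append, h]
      intro a ha hak
      exact hgm (hak ▸ ha)

-- ===== VERDICT (by name: the statement is the Claim_ definition above) =====
theorem merge_consts_spec : Claim_equal_merge_consts := by
  intro l _
  unfold Spec_merge_consts merge_consts merge_consts_alt
  rw [← List.foldl_flatten, ← List.foldl_flatten]
  have hnd : (l.flatten.foldl mc_stepG PySem.Dict.empty).keys.Nodup :=
    mc_nodup_groups _ _ (by simp)
  rw [mc_second_pass _ hnd]
  exact mc_invariant l.flatten PySem.Dict.empty PySem.Dict.empty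
    (by simp) (by intro p hp; simp [PySem.Dict.empty] at hp) (by rfl)
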